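-- pv_equiv track=rewrite | github.com/peptidoglycanthrope/universal-rm | misc.py | displayAsSeq
-- ===== SOURCE A (Python) =====
-- def displayAsSeq(n):
--   seq = []
--   current = 0 #keeps track of current number being read
--   while n > 0:
--     digit = n % 3
--     n //= 3
--     if digit == 2:
--       seq = [current] + seq
--       current = 0
--     else:
--       current = current*2 + digit #"append" to current
--   return str(seq[::-1])
-- ===== SOURCE B (Python) =====
-- def displayAsSeq(n):
--   s = ""
--   while n > 0:
--     s += str(n % 3)
--     n //= 3
--   parts = s.split('2')
--   vals = [int(p, 2) if p else 0 for p in parts[:-1]]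
--   return str(vals)
-- ===== Notes on version B (the rewrite author's own statement) =====
-- stated objective: idiomatic
-- what changed: B materializes the base-3 digit string LSB-first, splits it on the sentinel '2' and decodes each remaining piece as binary, instead of A's interleaved accumulator loop that prepends finished groups and reverses at the end.
import Mathlib
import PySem

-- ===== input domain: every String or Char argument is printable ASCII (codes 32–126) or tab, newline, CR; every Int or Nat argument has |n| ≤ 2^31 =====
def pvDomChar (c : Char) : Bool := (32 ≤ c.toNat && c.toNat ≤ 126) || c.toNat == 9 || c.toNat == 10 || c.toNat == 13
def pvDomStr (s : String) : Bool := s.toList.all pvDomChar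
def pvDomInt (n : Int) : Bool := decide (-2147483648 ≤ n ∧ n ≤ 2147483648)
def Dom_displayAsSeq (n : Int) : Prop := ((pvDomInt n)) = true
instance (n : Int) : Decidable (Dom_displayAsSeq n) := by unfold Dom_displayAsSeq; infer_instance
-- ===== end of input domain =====

-- B builds the base-3 digit string and splits it on '2' instead of A's interleaved
-- accumulator loop (objective: a more idiomatic decomposition; same cost).

-- termination helper for both loops (cited by name in decreasing_by)
theorem pvFdiv3_lt (n : Int) (h : 0 < n) : (PySem.Int.floordiv n 3).toNat < n.toNat := by
  have : n.fdiv 3 = n / 3 := Int.fdiv_eq_ediv_of_nonneg n (by norm_num)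
  simp only [PySem.Int.floordiv, this]; omega

-- ===== PORT A =====
-- the while loop: state (n, seq, current)
def displayAsSeqLoop (n : Int) (seq : List Int) (current : Int) : List Int :=
  if h : 0 < n then
    let digit := PySem.Int.mod n 3
    let n' := PySem.Int.floordiv n 3
    if digit = 2 then displayAsSeqLoop n' (current :: seq) 0   -- seq = [current] + seq
    else displayAsSeqLoop n' seq (current * 2 + digit)
  else seq
termination_by n.toNat
decreasing_by all_goals exact pvFdiv3_lt n h

-- str(list-of-ints): Python renders "[a, b, c]" — exact for int elements (both Pythons call str)
def pvRenderList (xs : List Int) : String :=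
  "[" ++ String.intercalate ", " (xs.map PySem.Int.toStr) ++ "]"

def displayAsSeq (n : Int) : String :=
  pvRenderList (displayAsSeqLoop n [] 0).reverse   -- seq[::-1] : exact = List.reverse

-- ===== PORT B =====
-- the while loop of B: s += str(n % 3); n //= 3
def pvBuildDigits (n : Int) (s : String) : String :=
  if h : 0 < n then
    pvBuildDigits (PySem.Int.floordiv n 3) (s ++ PySem.Int.toStr (PySem.Int.mod n 3))
  else s
termination_by n.toNat
decreasing_by all_goals exact pvFdiv3_lt n h

-- int(p, 2) if p else 0 : exact here since every piece consists of '0'/'1' only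
def pvDecodeBin (p : List Char) : Int :=
  if p = [] then 0 else p.foldl (fun a c => a * 2 + ((c.toNat : Int) - 48)) 0

def displayAsSeq_alt (n : Int) : String :=
  let s := pvBuildDigits n ""
  let parts := PySem.Chars.splitOn s.toList ['2']   -- s.split('2') : exact, sep nonempty
  pvRenderList ((parts.dropLast).map pvDecodeBin)      -- parts[:-1] : exact = dropLast

-- ===== PRECONDITION & SPEC =====
def Spec_displayAsSeq (n : Int) (out : String) : Prop := out = displayAsSeq_alt n
instance (n : Int) (out : String) : Decidable (Spec_displayAsSeq n out) := by unfold Spec_displayAsSeq; infer_instance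

-- ===== CLAIM (what is proved, stated in full; the proofs are below) =====
def Claim_equal_displayAsSeq : Prop := ∀ (n : Int), Dom_displayAsSeq n → Spec_displayAsSeq n (displayAsSeq n)

-- ===== LEMMAS AND PROOFS =====

-- the base-3 digits of n, least significant first
def pvDigits (n : Int) : List Int :=
  if h : 0 < n then PySem.Int.mod n 3 :: pvDigits (PySem.Int.floordiv n 3) else []
termination_by n.toNat
decreasing_by all_goals exact pvFdiv3_lt n h

-- A's loop as structural recursion over the digit list
def pvLoopL : List Int → List Int → Int → List Int
  | [], seq, _ => seq
  | d :: t, seq, c => if d = 2 then pvLoopL t (c :: seq) 0 else pvLoopL t seq (c * 2 + d)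

-- the groups, in output order, starting a group at c
def pvEmit : List Int → Int → List Int
  | [], _ => []
  | d :: t, c => if d = 2 then c :: pvEmit t 0 else pvEmit t (c * 2 + d)

theorem pvMod3_eq (n : Int) : PySem.Int.mod n 3 = n % 3 := by
  simp only [PySem.Int.mod]
  have := Int.fmod_eq_emod (a := n) (b := 3); simp at this; omega

theorem pvLoop_eq_loopL (n : Int) (seq : List Int) (c : Int) :
    displayAsSeqLoop n seq c = pvLoopL (pvDigits n) seq c := by
  fun_induction displayAsSeqLoop n seq c with
  | case1 n seq c h digit n' hdig ih =>
    rw [pvDigits, dif_pos h, pvLoopL, if_pos (show PySem.Int.mod n 3 = 2 from hdig)]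
    exact ih
  | case2 n seq c h digit n' hdig ih =>
    rw [pvDigits, dif_pos h, pvLoopL, if_neg (show ¬ PySem.Int.mod n 3 = 2 from hdig)]
    exact ih
  | case3 n seq c h => rw [pvDigits, dif_neg h, pvLoopL]

theorem pvLoopL_reverse (ds : List Int) (seq : List Int) (c : Int) :
    (pvLoopL ds seq c).reverse = seq.reverse ++ pvEmit ds c := by
  induction ds generalizing seq c with
  | nil => simp [pvLoopL, pvEmit]
  | cons d t ih =>
    by_cases hd : d = 2
    · simp [pvLoopL, pvEmit, hd, ih]
    · simp [pvLoopL, pvEmit, hd, ih]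

theorem pvDigits_mem (n : Int) : ∀ d ∈ pvDigits n, 0 ≤ d ∧ d < 3 := by
  fun_induction pvDigits n with
  | case1 n h ih =>
    intro d hd
    rw [List.mem_cons] at hd
    rcases hd with h1 | h1
    · subst h1; rw [pvMod3_eq]; omega
    · exact ih d h1
  | case2 n h => intro d hd; simp at hd

-- B's digit-building loop appends pvDigitsStr
def pvDigitsStr (n : Int) : String :=
  if h : 0 < n then PySem.Int.toStr (PySem.Int.mod n 3) ++ pvDigitsStr (PySem.Int.floordiv n 3) else ""
termination_by n.toNat
decreasing_by all_goals exact pvFdiv3_lt n h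

theorem pvBuildDigits_eq (n : Int) (s : String) : pvBuildDigits n s = s ++ pvDigitsStr n := by
  fun_induction pvBuildDigits n s with
  | case1 n s h ih => rw [pvDigitsStr, dif_pos h, ih, String.append_assoc]
  | case2 n s h => rw [pvDigitsStr, dif_neg h]; simp

def pvDChar (d : Int) : Char := Char.ofNat (48 + d.toNat)

theorem pvToStr_digit (d : Int) (h0 : 0 ≤ d) (h3 : d < 3) :
    (PySem.Int.toStr d).toList = [pvDChar d] := by
  interval_cases d <;> decide

theorem pvDigitsStr_toList (n : Int) : (pvDigitsStr n).toList = (pvDigits n).map pvDChar := by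
  fun_induction pvDigitsStr n with
  | case1 n h ih =>
    rw [pvDigits, dif_pos h]
    have ht := pvToStr_digit (PySem.Int.mod n 3) (by rw [pvMod3_eq]; omega) (by rw [pvMod3_eq]; omega)
    simp only [String.toList_append, ht, ih, List.map_cons, List.cons_append, List.nil_append]
  | case2 n h => rw [pvDigits, dif_neg h]; simp

-- the split of a char list on the single separator '2', structurally
def pvSplit2 : List Char → List Char → List (List Char)
  | [], cur => [cur.reverse]
  | c :: rest, cur => if c = '2' then cur.reverse :: pvSplit2 rest [] else pvSplit2 rest (c :: cur)

theorem pvGo_spec (fuel : Nat) : ∀ (l cur : List Char) (acc : List (List Char)),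
    l.length < fuel →
    PySem.Chars.splitOn.go ['2'] fuel l cur acc = acc.reverse ++ pvSplit2 l cur := by
  induction fuel with
  | zero => intro l cur acc h; omega
  | succ fuel ih =>
    intro l cur acc h
    cases l with
    | nil =>
      rw [PySem.Chars.splitOn.go, pvSplit2]
      simp
      omega
    | cons c rest =>
      rw [PySem.Chars.splitOn.go]
      by_cases hc : c = '2'
      · have hp : ['2'].isPrefixOf (c :: rest) = true := by simp [List.isPrefixOf, hc]
        rw [if_pos hp, pvSplit2, if_pos hc]
        have : List.drop ['2'].length (c :: rest) = rest := by simp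
        rw [this, ih rest [] (cur.reverse :: acc) (by simpa using Nat.lt_of_succ_lt_succ h)]
        simp
      · have hp : ¬ ['2'].isPrefixOf (c :: rest) = true := by
          simp [List.isPrefixOf]
          exact fun h' => hc h'.symm
        rw [if_neg hp, pvSplit2, if_neg hc]
        exact ih rest (c :: cur) acc (by simpa using Nat.lt_of_succ_lt_succ h)

theorem pvSplitOn_eq (l : List Char) : PySem.Chars.splitOn l ['2'] = pvSplit2 l [] := by
  rw [PySem.Chars.splitOn]
  simpa using pvGo_spec (l.length + 1) l [] [] (by omega)

theorem pvSplit2_ne_nil (l cur : List Char) : pvSplit2 l cur ≠ [] := by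
  induction l generalizing cur with
  | nil => simp [pvSplit2]
  | cons c rest ih =>
    rw [pvSplit2]
    by_cases hc : c = '2'
    · simp [hc]
    · simp [hc, ih]

theorem pvDecodeBin_eq_foldl (p : List Char) :
    pvDecodeBin p = p.foldl (fun a c => a * 2 + ((c.toNat : Int) - 48)) 0 := by
  cases p with
  | nil => rfl
  | cons c t => rw [pvDecodeBin, if_neg (by simp)]

theorem pvDChar_ne_two (d : Int) (h0 : 0 ≤ d) (h3 : d < 3) (hd : d ≠ 2) : pvDChar d ≠ '2' := by
  interval_cases d <;> simp_all <;> decide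

-- main bridge: decoding the completed pieces gives exactly A's emitted groups
theorem pvSplit2_decode (ds : List Int) (hds : ∀ d ∈ ds, 0 ≤ d ∧ d < 3) (cur : List Char)
    (hcur : ∀ c ∈ cur, c ≠ '2') :
    ((pvSplit2 (ds.map pvDChar) cur).dropLast).map pvDecodeBin
      = pvEmit ds (pvDecodeBin cur.reverse) := by
  induction ds generalizing cur with
  | nil => simp [pvSplit2, pvEmit]
  | cons d t ih =>
    have hd := hds d (by simp)
    have ht : ∀ x ∈ t, 0 ≤ x ∧ x < 3 := fun x hx => hds x (by simp [hx])
    by_cases h2 : d = 2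
    · rw [List.map_cons, pvSplit2, if_pos (by rw [h2]; rfl), pvEmit, if_pos h2]
      rw [List.dropLast_cons_of_ne_nil (pvSplit2_ne_nil _ _), List.map_cons]
      rw [ih ht [] (by simp)]
      simp [pvDecodeBin]
    · rw [List.map_cons, pvSplit2, if_neg (pvDChar_ne_two d hd.1 hd.2 h2), pvEmit, if_neg h2]
      rw [ih ht (pvDChar d :: cur) ?side]
      · congr 1
        rw [pvDecodeBin_eq_foldl, pvDecodeBin_eq_foldl, List.reverse_cons, List.foldl_append]
        have : ((pvDChar d).toNat : Int) - 48 = d := by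
          have := hd.1; have := hd.2; interval_cases d <;> decide
        simp [this]
      case side =>
        intro c hc
        rcases List.mem_cons.mp hc with h | h
        · subst h; exact pvDChar_ne_two d hd.1 hd.2 h2
        · exact hcur c h

-- ===== VERDICT (by name: the statement is the Claim_ definition above) =====
theorem displayAsSeq_spec : Claim_equal_displayAsSeq := by
  intro n _
  unfold Spec_displayAsSeq displayAsSeq displayAsSeq_alt
  rw [pvLoop_eq_loopL, pvBuildDigits_eq]
  show pvRenderList (pvLoopL (pvDigits n) [] 0).reverse
      = pvRenderList (((PySem.Chars.splitOn ("" ++ pvDigitsStr n).toList ['2']).dropLast).map pvDecodeBin)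
  have hs : ("" ++ pvDigitsStr n).toList = (pvDigits n).map pvDChar := by
    simpa using pvDigitsStr_toList n
  rw [pvLoopL_reverse, hs, pvSplitOn_eq,
      pvSplit2_decode (pvDigits n) (pvDigits_mem n) [] (by simp)]
  simp [pvDecodeBin]
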